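-- pv_equiv track=rewrite | github.com/SubhPB/leet-code | src/app/2025/contests/467/3686.py | countStableSubsequences
-- ===== SOURCE A (Python) =====
-- from typing import List
--
-- def countStableSubsequences(nums: List[int]) -> int:
--     n = len(nums); hsh = [0]*n
--     for i,num in enumerate(nums):
--         hsh[i]=hsh[max(0,i-1)]
--         if not num&1: hsh[i]+=1
--     res = 0; M = 10**9+7
--     add = lambda x,y: (x%M + y%M)%M
--     for l in range(n-2):
--         for r in range(l+2,n):
--             x = sum([nums[i]&1 for i in (l,r)])
--             d = hsh[r]-hsh[l]
--             if x == 2: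
--                 res = add(res, d)
--             elif x == 1:
--                 res = add(res, r-l-1) # relax by 1
--             else: #-> 0
--                 res = add(res, r-l-d)
--     return res
-- ===== SOURCE B (Python) =====
-- from typing import List
--
-- def countStableSubsequences(nums: List[int]) -> int:
--     # One pass over r with prefix accumulators, O(n) instead of O(n^2).
--     M = 10**9 + 7
--     n = len(nums)
--     E = []  # E[i] = number of evens in nums[0..i]
--     e = 0
--     for v in nums:
--         if v % 2 == 0:
--             e += 1
--         E.append(e)
--     total = 0
--     cO = sO = lO = 0  # count / sum of E[l] / sum of l over odd nums[l], l <= r-2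
--     cE = sE = lE = 0  # same over even nums[l]
--     for r in range(2, n):
--         l = r - 2
--         if nums[l] % 2 == 1:
--             cO += 1; sO += E[l]; lO += l
--         else:
--             cE += 1; sE += E[l]; lE += l
--         if nums[r] % 2 != 0:
--             total += cO * E[r] - sO + cE * (r - 1) - lE
--         else:
--             total += cO * (r - 1) - lO + cE * (r - E[r]) + sE - lE
--     return total % M
-- ===== Notes on version B (the rewrite author's own statement) =====
-- stated objective: faster
-- what changed: Replaces the O(n^2) double loop over pairs (l,r) by a single pass over r that maintains prefix accumulators (counts, sums of indices and of even-prefix-counts, split by parity of nums[l]), turning each inner scan into a closed-form expression.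
import Mathlib
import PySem

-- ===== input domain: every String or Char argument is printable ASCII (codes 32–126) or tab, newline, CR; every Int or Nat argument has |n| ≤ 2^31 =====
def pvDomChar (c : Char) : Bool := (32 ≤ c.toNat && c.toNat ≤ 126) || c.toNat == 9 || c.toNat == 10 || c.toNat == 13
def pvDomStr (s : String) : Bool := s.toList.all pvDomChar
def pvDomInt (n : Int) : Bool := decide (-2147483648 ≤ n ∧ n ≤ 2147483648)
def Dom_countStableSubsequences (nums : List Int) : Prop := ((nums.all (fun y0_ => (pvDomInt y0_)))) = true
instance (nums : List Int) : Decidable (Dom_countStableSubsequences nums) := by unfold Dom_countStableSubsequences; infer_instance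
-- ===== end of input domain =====

-- B replaces A's O(n^2) double loop by one pass over r with prefix accumulators split by parity (objective: faster, asymptotic).

-- ===== PORT A =====
def countStableSubsequences (nums : List Int) : Int :=
  let n : Int := nums.length
  let hsh : List Int :=
    (nums.foldl (fun acc num =>
      let h := acc.headD 0
      (if PySem.Int.band num 1 == 0 then h + 1 else h) :: acc) []).reverse
  let M : Int := 10 ^ 9 + 7
  let add : Int → Int → Int := fun x y => PySem.Int.mod (PySem.Int.mod x M + PySem.Int.mod y M) M
  (PySem.List.pyRange 0 (n - 2) 1).foldl (fun res l =>
    (PySem.List.pyRange (l + 2) n 1).foldl (fun res r =>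
      let x := PySem.Int.band (PySem.List.pyGetD nums l 0) 1 +
               PySem.Int.band (PySem.List.pyGetD nums r 0) 1
      let d := PySem.List.pyGetD hsh r 0 - PySem.List.pyGetD hsh l 0
      if x == 2 then add res d
      else if x == 1 then add res (r - l - 1)
      else add res (r - l - d)) res) 0

-- ===== PORT B =====
structure BSt where
  total : Int
  cO : Int
  sO : Int
  lO : Int
  cE : Int
  sE : Int
  lE : Int
deriving Repr, DecidableEq

def countStableSubsequences_alt (nums : List Int) : Int :=
  let M : Int := 10 ^ 9 + 7
  let n : Int := nums.length
  let E : List Int :=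
    (nums.foldl (fun (p : Int × List Int) v =>
      let e := if PySem.Int.mod v 2 == 0 then p.1 + 1 else p.1
      (e, p.2 ++ [e])) ((0 : Int), ([] : List Int))).2
  let s := (PySem.List.pyRange 2 n 1).foldl (fun (s : BSt) r =>
    let l := r - 2
    let s :=
      if PySem.Int.mod (PySem.List.pyGetD nums l 0) 2 == 1 then
        { s with cO := s.cO + 1, sO := s.sO + PySem.List.pyGetD E l 0, lO := s.lO + l }
      else
        { s with cE := s.cE + 1, sE := s.sE + PySem.List.pyGetD E l 0, lE := s.lE + l }
    if PySem.Int.mod (PySem.List.pyGetD nums r 0) 2 != 0 then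
      { s with total := s.total + (s.cO * PySem.List.pyGetD E r 0 - s.sO + s.cE * (r - 1) - s.lE) }
    else
      { s with total := s.total + (s.cO * (r - 1) - s.lO + s.cE * (r - PySem.List.pyGetD E r 0) + s.sE - s.lE) }
    ) ⟨0, 0, 0, 0, 0, 0, 0⟩
  PySem.Int.mod s.total M

-- ===== PRECONDITION & SPEC =====
def Spec_countStableSubsequences (nums : List Int) (out : Int) : Prop := out = countStableSubsequences_alt nums
instance (nums : List Int) (out : Int) : Decidable (Spec_countStableSubsequences nums out) := by unfold Spec_countStableSubsequences; infer_instance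

-- ===== CLAIM (what is proved, stated in full; the proofs are below) =====
def Claim_equal_countStableSubsequences : Prop := ∀ (nums : List Int), Dom_countStableSubsequences nums → Spec_countStableSubsequences nums (countStableSubsequences nums)

-- ===== LEMMAS AND PROOFS =====

-- the modulus
def pvM : Int := 1000000007

-- canonical parity bit of nums[i] (0 or 1)
def pvBit (nums : List Int) (i : Nat) : Int := (nums.getD i 0) % 2

-- number of even entries among the first k entries, as Int
def pvP (nums : List Int) (k : Nat) : Int :=
  ((nums.take k).countP (fun v => decide (v % 2 = 0)) : Int)

-- per-pair weight summed by both programs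
def pvF (nums : List Int) (l r : Nat) : Int :=
  let a := pvBit nums l
  let b := pvBit nums r
  let d := pvP nums (r + 1) - pvP nums (l + 1)
  if a + b = 2 then d
  else if a + b = 1 then (r : Int) - (l : Int) - 1
  else (r : Int) - (l : Int) - d

-- running even-count scan; both programs' prefix arrays equal this
def pvScan (c : Int) : List Int → List Int
  | [] => []
  | v :: t => (if v % 2 = 0 then c + 1 else c) :: pvScan (if v % 2 = 0 then c + 1 else c) t

def pvInner (nums : List Int) (r : Nat) : Int :=
  ∑ l ∈ Finset.range (r - 1), pvF nums l r

def pvS (nums : List Int) (m : Nat) : Int :=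
  ∑ r ∈ Finset.range m, pvInner nums r

theorem pvScan_getD (xs : List Int) (c : Int) (i : Nat) (hi : i < xs.length) :
    (pvScan c xs).getD i 0 = c + ((xs.take (i+1)).countP (fun v => decide (v % 2 = 0)) : Int) := by
  induction xs generalizing c i with
  | nil => simp at hi
  | cons v t ih =>
    cases i with
    | zero =>
      rw [show pvScan c (v :: t) = (if v % 2 = 0 then c + 1 else c) :: pvScan (if v % 2 = 0 then c + 1 else c) t from rfl,
        List.getD_cons_zero, List.take_succ_cons, List.take_zero, List.countP_cons, List.countP_nil]
      by_cases h : v % 2 = 0 <;>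
        simp only [h, decide_true, decide_false, if_true, if_false] <;> push_cast <;> ring
    | succ j =>
      simp only [List.length_cons] at hi
      rw [show pvScan c (v :: t) = (if v % 2 = 0 then c + 1 else c) :: pvScan (if v % 2 = 0 then c + 1 else c) t from rfl,
        List.getD_cons_succ, ih _ j (by omega), List.take_succ_cons, List.countP_cons]
      by_cases h : v % 2 = 0 <;>
        simp only [h, decide_true, decide_false, if_true, if_false] <;> push_cast <;> ring

-- A's hsh-building loop computes pvScan
theorem pvA_hsh (xs : List Int) (acc : List Int) (c : Int) (hc : acc.headD 0 = c) :
    xs.foldl (fun acc num =>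
      (if PySem.Int.band num 1 == 0 then acc.headD 0 + 1 else acc.headD 0) :: acc) acc
    = (pvScan c xs).reverse ++ acc := by
  induction xs generalizing acc c with
  | nil => simp [pvScan]
  | cons v t ih =>
    have hb : PySem.Int.band v 1 = v % 2 := by
      rw [PySem.Int.band_one, PySem.Int.mod_eq_emod_of_pos (by norm_num)]
    simp only [List.foldl_cons, pvScan, hc, hb]
    by_cases h : v % 2 = 0
    · rw [if_pos (by simp [h]), ih _ (c+1) rfl]; simp [h]
    · rw [if_neg (by simp [h]), ih _ c rfl]; simp [h]

-- B's E-building loop computes pvScan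
theorem pvB_E (xs : List Int) (c : Int) (L : List Int) :
    (xs.foldl (fun (p : Int × List Int) v =>
      ((if PySem.Int.mod v 2 == 0 then p.1 + 1 else p.1),
       p.2 ++ [if PySem.Int.mod v 2 == 0 then p.1 + 1 else p.1])) (c, L)).2
    = L ++ pvScan c xs := by
  induction xs generalizing c L with
  | nil => simp [pvScan]
  | cons v t ih =>
    have hm : PySem.Int.mod v 2 = v % 2 := PySem.Int.mod_eq_emod_of_pos (by norm_num)
    simp only [List.foldl_cons, pvScan, hm]
    by_cases h : v % 2 = 0
    · rw [if_pos (by simp [h]), ih]; simp [h]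
    · rw [if_neg (by simp [h]), ih]; simp [h]

-- mod-accumulating fold is a plain sum mod M
theorem pvModFold (rs : List Int) (g : Int → Int) (a : Int) :
    rs.foldl (fun res r => ((res % pvM) + (g r % pvM)) % pvM) (a % pvM)
    = (a + (rs.map g).sum) % pvM := by
  induction rs generalizing a with
  | nil => simp
  | cons r t ih =>
    simp only [List.foldl_cons, List.map_cons, List.sum_cons]
    rw [Int.emod_emod_of_dvd _ dvd_rfl, ← Int.add_emod, ih]
    ring_nf

-- the inner weight as A's code computes it
def pvG (nums hsh : List Int) (l r : Int) : Int :=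
  if (PySem.Int.band (PySem.List.pyGetD nums l 0) 1 + PySem.Int.band (PySem.List.pyGetD nums r 0) 1) == 2 then
    PySem.List.pyGetD hsh r 0 - PySem.List.pyGetD hsh l 0
  else if (PySem.Int.band (PySem.List.pyGetD nums l 0) 1 + PySem.Int.band (PySem.List.pyGetD nums r 0) 1) == 1 then
    r - l - 1
  else r - l - (PySem.List.pyGetD hsh r 0 - PySem.List.pyGetD hsh l 0)

theorem pvModFoldA (nums H : List Int) (rs : List Int) (l : Int) (a : Int) :
    rs.foldl (fun res r =>
      if (PySem.Int.band (PySem.List.pyGetD nums l 0) 1 + PySem.Int.band (PySem.List.pyGetD nums r 0) 1) == 2 then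
        PySem.Int.mod (PySem.Int.mod res pvM + PySem.Int.mod (PySem.List.pyGetD H r 0 - PySem.List.pyGetD H l 0) pvM) pvM
      else if (PySem.Int.band (PySem.List.pyGetD nums l 0) 1 + PySem.Int.band (PySem.List.pyGetD nums r 0) 1) == 1 then
        PySem.Int.mod (PySem.Int.mod res pvM + PySem.Int.mod (r - l - 1) pvM) pvM
      else
        PySem.Int.mod (PySem.Int.mod res pvM + PySem.Int.mod (r - l - (PySem.List.pyGetD H r 0 - PySem.List.pyGetD H l 0)) pvM) pvM)
      (a % pvM)
    = (a + (rs.map (pvG nums H l)).sum) % pvM := by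
  have hMpos : (0:ℤ) < pvM := by norm_num [pvM]
  have hf : ∀ (f g : ℤ → ℤ → ℤ), f = g → rs.foldl f (a % pvM) = rs.foldl g (a % pvM) := by
    intro f g h; rw [h]
  refine (hf _ (fun res r => (res % pvM + (pvG nums H l r) % pvM) % pvM) ?_).trans
    (pvModFold rs (pvG nums H l) a)
  funext res r
  simp only [pvG, PySem.Int.mod_eq_emod_of_pos hMpos]
  split_ifs <;> rfl

theorem pvNestedA (nums H : List Int) (xs : List Int) (n' : Int) (a : Int) :
    xs.foldl (fun res l => (PySem.List.pyRange (l+2) n' 1).foldl (fun res r =>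
      if (PySem.Int.band (PySem.List.pyGetD nums l 0) 1 + PySem.Int.band (PySem.List.pyGetD nums r 0) 1) == 2 then
        PySem.Int.mod (PySem.Int.mod res pvM + PySem.Int.mod (PySem.List.pyGetD H r 0 - PySem.List.pyGetD H l 0) pvM) pvM
      else if (PySem.Int.band (PySem.List.pyGetD nums l 0) 1 + PySem.Int.band (PySem.List.pyGetD nums r 0) 1) == 1 then
        PySem.Int.mod (PySem.Int.mod res pvM + PySem.Int.mod (r - l - 1) pvM) pvM
      else
        PySem.Int.mod (PySem.Int.mod res pvM + PySem.Int.mod (r - l - (PySem.List.pyGetD H r 0 - PySem.List.pyGetD H l 0)) pvM) pvM) res)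
      (a % pvM)
    = (a + (xs.map (fun l => ((PySem.List.pyRange (l+2) n' 1).map (pvG nums H l)).sum)).sum) % pvM := by
  induction xs generalizing a with
  | nil => simp
  | cons x t ih =>
    simp only [List.foldl_cons, List.map_cons, List.sum_cons]
    rw [pvModFoldA, ih]
    ring_nf


theorem pvG_eq_F (nums : List Int) (l r : Nat) (hl : l < nums.length) (hr : r < nums.length) :
    pvG nums (pvScan 0 nums) (l : Int) (r : Int) = pvF nums l r := by
  have h2 : (0:ℤ) < 2 := by norm_num
  have hsl : (pvScan 0 nums).getD l 0 = 0 + ((nums.take (l+1)).countP (fun v => decide (v % 2 = 0)) : Int) :=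
    pvScan_getD nums 0 l hl
  have hsr : (pvScan 0 nums).getD r 0 = 0 + ((nums.take (r+1)).countP (fun v => decide (v % 2 = 0)) : Int) :=
    pvScan_getD nums 0 r hr
  simp only [pvG, pvF, pvBit, pvP, PySem.List.pyGetD_natCast, PySem.Int.band_one,
    PySem.Int.mod_eq_emod_of_pos h2, hsl, hsr, zero_add, beq_iff_eq]

theorem pvSumRange (n : Nat) (f : Nat → Int) :
    ((List.range n).map f).sum = ∑ i ∈ Finset.range n, f i := by
  induction n with
  | zero => simp
  | succ n ih => rw [List.range_succ, List.map_append, List.sum_append, Finset.sum_range_succ, ih]; simp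

theorem pvExchange (nums : List Int) :
    ∑ l ∈ Finset.range (nums.length - 2), ∑ j ∈ Finset.range (nums.length - l - 2), pvF nums l (l+2+j)
    = pvS nums nums.length := by
  set m := nums.length with hm
  have h1 : ∀ l, ∑ j ∈ Finset.range (m - l - 2), pvF nums l (l+2+j)
      = ∑ r ∈ Finset.Ico (l+2) m, pvF nums l r := by
    intro l
    rw [Finset.sum_Ico_eq_sum_range]
    apply Finset.sum_congr (by rw [Nat.sub_sub]) (fun j _ => rfl)
  have h2 : ∀ l, ∑ r ∈ Finset.Ico (l+2) m, pvF nums l r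
      = ∑ r ∈ Finset.range m, if l+2 ≤ r then pvF nums l r else 0 := by
    intro l
    rw [← Finset.sum_filter]
    apply Finset.sum_congr _ (fun r _ => rfl)
    ext r; simp [Finset.mem_filter, Finset.mem_Ico]; omega
  have h3 : ∑ l ∈ Finset.range (m - 2), ∑ r ∈ Finset.range m, (if l+2 ≤ r then pvF nums l r else 0)
      = ∑ l ∈ Finset.range m, ∑ r ∈ Finset.range m, (if l+2 ≤ r then pvF nums l r else 0) := by
    apply Finset.sum_subset (Finset.range_subset_range.mpr (Nat.sub_le m 2))
    intro l hl hnl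
    simp only [Finset.mem_range] at hl hnl
    apply Finset.sum_eq_zero
    intro r hr
    simp only [Finset.mem_range] at hr
    rw [if_neg (by omega)]
  calc ∑ l ∈ Finset.range (m - 2), ∑ j ∈ Finset.range (m - l - 2), pvF nums l (l+2+j)
      = ∑ l ∈ Finset.range (m - 2), ∑ r ∈ Finset.range m, (if l+2 ≤ r then pvF nums l r else 0) := by
        apply Finset.sum_congr rfl; intro l _; rw [h1, h2]
    _ = ∑ l ∈ Finset.range m, ∑ r ∈ Finset.range m, (if l+2 ≤ r then pvF nums l r else 0) := h3
    _ = ∑ r ∈ Finset.range m, ∑ l ∈ Finset.range m, (if l+2 ≤ r then pvF nums l r else 0) := Finset.sum_comm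
    _ = pvS nums m := by
        apply Finset.sum_congr rfl
        intro r hr
        simp only [Finset.mem_range] at hr
        rw [pvInner, ← Finset.sum_filter]
        apply Finset.sum_congr _ (fun l _ => rfl)
        ext l; simp [Finset.mem_filter, Finset.mem_range]; omega

theorem pvA_sum (nums : List Int) :
    ((PySem.List.pyRange 0 ((nums.length:Int) - 2) 1).map (fun l =>
      ((PySem.List.pyRange (l+2) (nums.length:Int) 1).map (pvG nums (pvScan 0 nums) l)).sum)).sum
    = pvS nums nums.length := by
  rw [PySem.List.pyRange_one, List.map_map]
  rw [show (((nums.length:Int) - 2) - 0).toNat = nums.length - 2 from by omega]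
  rw [pvSumRange, ← pvExchange]
  apply Finset.sum_congr rfl
  intro l hl
  simp only [Finset.mem_range] at hl
  simp only [Function.comp_apply, zero_add]
  rw [PySem.List.pyRange_one, List.map_map]
  rw [show ((nums.length:Int) - ((l:Int)+2)).toNat = nums.length - l - 2 from by omega]
  rw [pvSumRange]
  apply Finset.sum_congr rfl
  intro j hj
  simp only [Finset.mem_range] at hj
  simp only [Function.comp_apply]
  rw [show ((l:Int)+2+(j:Int)) = ((l+2+j : Nat) : Int) from by push_cast; ring]
  exact pvG_eq_F nums l (l+2+j) (by omega) (by omega)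

theorem A_eq (nums : List Int) :
    countStableSubsequences nums = (pvS nums nums.length) % pvM := by
  simp only [countStableSubsequences]
  rw [pvA_hsh nums [] 0 rfl, List.append_nil, List.reverse_reverse]
  rw [show (10:Int)^9 + 7 = pvM from by norm_num [pvM]]
  have h := pvNestedA nums (pvScan 0 nums) (PySem.List.pyRange 0 ((nums.length:Int) - 2) 1)
    (nums.length:Int) 0
  simp only [Int.zero_emod, zero_add] at h
  rw [h, pvA_sum]


def pvOI (nums : List Int) (l : Nat) : Int := if pvBit nums l = 1 then 1 else 0
def pvEI (nums : List Int) (l : Nat) : Int := if pvBit nums l = 1 then 0 else 1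
def pvT (nums : List Int) (t : Nat) : Int := ∑ k ∈ Finset.range t, pvInner nums (k+2)

theorem pvKey_odd (nums : List Int) (t : Nat) (hodd : pvBit nums (t+2) = 1) :
    pvInner nums (t+2) =
      (∑ l ∈ Finset.range (t+1), pvOI nums l) * pvP nums (t+3)
      - (∑ l ∈ Finset.range (t+1), pvOI nums l * pvP nums (l+1))
      + (∑ l ∈ Finset.range (t+1), pvEI nums l) * ((t:Int)+1)
      - (∑ l ∈ Finset.range (t+1), pvEI nums l * (l:Int)) := by
  have hpt : ∀ l ∈ Finset.range (t+1), pvF nums l (t+2)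
      = pvOI nums l * pvP nums (t+3) - pvOI nums l * pvP nums (l+1)
        + pvEI nums l * ((t:Int)+1) - pvEI nums l * (l:Int) := by
    intro l _
    have hodd' : nums.getD (t+2) 0 % 2 = 1 := hodd
    rcases Int.emod_two_eq (nums.getD l 0) with h | h <;>
      · simp only [pvF, pvBit, pvOI, pvEI, hodd', h]
        norm_num
        try push_cast
        try ring
  rw [pvInner, show (t+2) - 1 = t+1 from rfl, Finset.sum_congr rfl hpt]
  rw [Finset.sum_sub_distrib, Finset.sum_add_distrib, Finset.sum_sub_distrib,
    Finset.sum_mul, Finset.sum_mul]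

theorem pvKey_even (nums : List Int) (t : Nat) (hev : pvBit nums (t+2) = 0) :
    pvInner nums (t+2) =
      (∑ l ∈ Finset.range (t+1), pvOI nums l) * ((t:Int)+1)
      - (∑ l ∈ Finset.range (t+1), pvOI nums l * (l:Int))
      + (∑ l ∈ Finset.range (t+1), pvEI nums l) * (((t:Int)+2) - pvP nums (t+3))
      + (∑ l ∈ Finset.range (t+1), pvEI nums l * pvP nums (l+1))
      - (∑ l ∈ Finset.range (t+1), pvEI nums l * (l:Int)) := by
  have hpt : ∀ l ∈ Finset.range (t+1), pvF nums l (t+2)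
      = pvOI nums l * ((t:Int)+1) - pvOI nums l * (l:Int)
        + pvEI nums l * (((t:Int)+2) - pvP nums (t+3))
        + pvEI nums l * pvP nums (l+1) - pvEI nums l * (l:Int) := by
    intro l _
    have hev' : nums.getD (t+2) 0 % 2 = 0 := hev
    rcases Int.emod_two_eq (nums.getD l 0) with h | h <;>
      · simp only [pvF, pvBit, pvOI, pvEI, hev', h]
        norm_num
        try push_cast
        try ring
  rw [pvInner, show (t+2) - 1 = t+1 from rfl, Finset.sum_congr rfl hpt]
  rw [Finset.sum_sub_distrib, Finset.sum_add_distrib, Finset.sum_add_distrib, Finset.sum_sub_distrib,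
    Finset.sum_mul, Finset.sum_mul]

theorem pvT_succ (nums : List Int) (t : Nat) :
    pvT nums (t+1) = pvT nums t + pvInner nums (t+2) := by
  rw [pvT, Finset.sum_range_succ, ← pvT]

theorem pvB_inv (nums : List Int) (t : Nat) (ht : t + 2 ≤ nums.length) :
    ((List.range t).map (fun (k : Nat) => (2 + (k:Int)))).foldl
      (fun (s : BSt) r =>
        let l := r - 2
        let s :=
          if PySem.Int.mod (PySem.List.pyGetD nums l 0) 2 == 1 then
            { s with cO := s.cO + 1, sO := s.sO + PySem.List.pyGetD (pvScan 0 nums) l 0, lO := s.lO + l }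
          else
            { s with cE := s.cE + 1, sE := s.sE + PySem.List.pyGetD (pvScan 0 nums) l 0, lE := s.lE + l }
        if PySem.Int.mod (PySem.List.pyGetD nums r 0) 2 != 0 then
          { s with total := s.total + (s.cO * PySem.List.pyGetD (pvScan 0 nums) r 0 - s.sO + s.cE * (r - 1) - s.lE) }
        else
          { s with total := s.total + (s.cO * (r - 1) - s.lO + s.cE * (r - PySem.List.pyGetD (pvScan 0 nums) r 0) + s.sE - s.lE) })
      ⟨0, 0, 0, 0, 0, 0, 0⟩
    = ⟨pvT nums t,
       ∑ l ∈ Finset.range t, pvOI nums l,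
       ∑ l ∈ Finset.range t, pvOI nums l * pvP nums (l+1),
       ∑ l ∈ Finset.range t, pvOI nums l * (l:Int),
       ∑ l ∈ Finset.range t, pvEI nums l,
       ∑ l ∈ Finset.range t, pvEI nums l * pvP nums (l+1),
       ∑ l ∈ Finset.range t, pvEI nums l * (l:Int)⟩ := by
  have h2 : (0:ℤ) < 2 := by norm_num
  induction t with
  | zero => simp [pvT]
  | succ t ih =>
    rw [List.range_succ, List.map_append, List.foldl_append, ih (by omega)]
    simp only [List.map_cons, List.map_nil, List.foldl_cons, List.foldl_nil]
    have hl2 : (2 + (t:Int) - 2) = ((t:Nat) : Int) := by ring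
    have hgl : PySem.List.pyGetD nums ((t:Nat) : Int) 0 = nums.getD t 0 :=
      PySem.List.pyGetD_natCast nums t 0
    have hscl : PySem.List.pyGetD (pvScan 0 nums) ((t:Nat) : Int) 0 = pvP nums (t+1) := by
      rw [PySem.List.pyGetD_natCast, pvScan_getD nums 0 t (by omega), zero_add]; rfl
    have hrc : (2 + (t:Int)) = ((t+2 : Nat) : Int) := by push_cast; ring
    have hgr : PySem.List.pyGetD nums (2 + (t:Int)) 0 = nums.getD (t+2) 0 := by
      rw [hrc, PySem.List.pyGetD_natCast]
    have hscr : PySem.List.pyGetD (pvScan 0 nums) (2 + (t:Int)) 0 = pvP nums (t+3) := by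
      rw [hrc, PySem.List.pyGetD_natCast, pvScan_getD nums 0 (t+2) (by omega), zero_add]; rfl
    simp only [hl2, hgl, hscl, hgr, hscr, PySem.Int.mod_eq_emod_of_pos h2]
    rcases Int.emod_two_eq (nums.getD t 0) with hl | hl <;>
      rcases Int.emod_two_eq (nums.getD (t+2) 0) with hr | hr
    · have hO : pvOI nums t = 0 := by simp only [pvOI, pvBit, hl]; norm_num
      have hE : pvEI nums t = 1 := by simp only [pvEI, pvBit, hl]; norm_num
      simp only [hl, hr]
      split_ifs with h1 h2 h3
      all_goals try exact absurd h1 (by decide)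
      all_goals try exact absurd h3 (by decide)
      all_goals simp only [BSt.mk.injEq, pvT_succ, Finset.sum_range_succ, hO, hE]
      all_goals refine ⟨?_, ?_, ?_, ?_, ?_, ?_, ?_⟩
      · rw [pvKey_even nums t hr]
        simp only [Finset.sum_range_succ, hO, hE]
        ring
      all_goals first | trivial | ring
    · have hO : pvOI nums t = 0 := by simp only [pvOI, pvBit, hl]; norm_num
      have hE : pvEI nums t = 1 := by simp only [pvEI, pvBit, hl]; norm_num
      simp only [hl, hr]
      split_ifs with h1 h2 h3
      all_goals try exact absurd h1 (by decide)
      all_goals try exact absurd h2 (by decide)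
      all_goals simp only [BSt.mk.injEq, pvT_succ, Finset.sum_range_succ, hO, hE]
      all_goals refine ⟨?_, ?_, ?_, ?_, ?_, ?_, ?_⟩
      · rw [pvKey_odd nums t hr]
        simp only [Finset.sum_range_succ, hO, hE]
        ring
      all_goals first | trivial | ring
    · have hO : pvOI nums t = 1 := by simp only [pvOI, pvBit, hl]; norm_num
      have hE : pvEI nums t = 0 := by simp only [pvEI, pvBit, hl]; norm_num
      simp only [hl, hr]
      split_ifs with h1 h2 h3
      all_goals try exact absurd h1 (by decide)
      all_goals try exact absurd h3 (by decide)
      all_goals simp only [BSt.mk.injEq, pvT_succ, Finset.sum_range_succ, hO, hE]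
      all_goals refine ⟨?_, ?_, ?_, ?_, ?_, ?_, ?_⟩
      · rw [pvKey_even nums t hr]
        simp only [Finset.sum_range_succ, hO, hE]
        ring
      all_goals first | trivial | ring
    · have hO : pvOI nums t = 1 := by simp only [pvOI, pvBit, hl]; norm_num
      have hE : pvEI nums t = 0 := by simp only [pvEI, pvBit, hl]; norm_num
      simp only [hl, hr]
      split_ifs with h1 h2 h3
      all_goals try exact absurd h1 (by decide)
      all_goals try exact absurd h2 (by decide)
      all_goals simp only [BSt.mk.injEq, pvT_succ, Finset.sum_range_succ, hO, hE]
      all_goals refine ⟨?_, ?_, ?_, ?_, ?_, ?_, ?_⟩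
      · rw [pvKey_odd nums t hr]
        simp only [Finset.sum_range_succ, hO, hE]
        ring
      all_goals first | trivial | ring

theorem pvS_eq_T (nums : List Int) (m : Nat) : pvS nums m = pvT nums (m - 2) := by
  induction m with
  | zero => simp [pvS, pvT]
  | succ m ih =>
    rw [pvS, Finset.sum_range_succ, ← pvS, ih]
    match m with
    | 0 => simp [pvT, pvInner]
    | 1 => simp [pvT, pvInner]
    | (k+2) =>
      rw [show k+2+1-2 = k+1 from rfl, show k+2-2 = k from rfl, pvT_succ]

theorem B_eq (nums : List Int) :
    countStableSubsequences_alt nums = (pvS nums nums.length) % pvM := by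
  simp only [countStableSubsequences_alt]
  rw [pvB_E nums 0 [], List.nil_append]
  rw [show (10:Int)^9 + 7 = pvM from by norm_num [pvM]]
  rw [PySem.Int.mod_eq_emod_of_pos (show (0:ℤ) < pvM from by norm_num [pvM])]
  by_cases hm : 2 ≤ nums.length
  · rw [PySem.List.pyRange_one, show ((nums.length:Int) - 2).toNat = nums.length - 2 from by omega]
    rw [pvB_inv nums (nums.length - 2) (by omega), pvS_eq_T]
  · rw [PySem.List.pyRange_one, show ((nums.length:Int) - 2).toNat = 0 from by omega]
    simp only [List.range_zero, List.map_nil, List.foldl_nil]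
    rcases nums with _ | ⟨a, _ | ⟨b, tl⟩⟩
    · simp [pvS]
    · simp [pvS, pvInner]
    · simp at hm

-- ===== VERDICT (by name: the statement is the Claim_ definition above) =====
theorem countStableSubsequences_spec : Claim_equal_countStableSubsequences := by
  intro nums _
  unfold Spec_countStableSubsequences
  rw [A_eq, B_eq]
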